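-- pv_equiv track=rewrite | github.com/csb6/thesis | covid_cases.py | by_date_and_state
-- ===== SOURCE A (Python) =====
-- def by_date_and_state(state_data):
--     covid_counts_by_date_and_state = {}
--     curr_date = None
--     curr_date_data = None
--     for date, state_code, new_cases in state_data:
--         if date != curr_date:
--             assert date not in covid_counts_by_date_and_state
--             curr_date = date
--             covid_counts_by_date_and_state[curr_date] = {}
--             curr_date_data = covid_counts_by_date_and_state[curr_date]
--
--         assert state_code not in curr_date_data
--         curr_date_data[state_code] = new_cases
--     return covid_counts_by_date_and_state
-- ===== SOURCE B (Python) =====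
-- def by_date_and_state(state_data):
--     covid_counts_by_date_and_state = {}
--     n = len(state_data)
--     i = 0
--     while i < n:
--         date = state_data[i][0]
--         assert date not in covid_counts_by_date_and_state
--         group = {}
--         j = i
--         while j < n and state_data[j][0] == date:
--             _, state_code, new_cases = state_data[j]
--             assert state_code not in group
--             group[state_code] = new_cases
--             j += 1
--         covid_counts_by_date_and_state[date] = group
--         i = j
--     return covid_counts_by_date_and_state
-- ===== Notes on version B (the rewrite author's own statement) =====
-- stated objective: alternative
-- what changed: Replaces A's single-pass state machine (curr_date tracking plus in-place mutation of an aliased inner dict) by an explicit two-level chunking scan: an outer loop finds each maximal run of equal dates, an inner loop builds that run's state dict, and the finished group is stored once.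
import Mathlib
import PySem

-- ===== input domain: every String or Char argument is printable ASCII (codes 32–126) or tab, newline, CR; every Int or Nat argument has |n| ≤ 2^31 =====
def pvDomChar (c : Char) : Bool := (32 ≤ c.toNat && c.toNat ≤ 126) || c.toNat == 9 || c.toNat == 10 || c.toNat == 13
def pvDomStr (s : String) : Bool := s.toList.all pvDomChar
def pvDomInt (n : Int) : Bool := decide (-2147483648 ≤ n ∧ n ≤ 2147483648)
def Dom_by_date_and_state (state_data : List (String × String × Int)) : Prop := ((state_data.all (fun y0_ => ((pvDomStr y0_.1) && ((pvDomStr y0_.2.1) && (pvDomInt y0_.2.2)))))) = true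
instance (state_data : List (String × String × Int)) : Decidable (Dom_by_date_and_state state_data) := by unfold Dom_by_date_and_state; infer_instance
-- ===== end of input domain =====

-- B replaces A's single-pass curr_date state machine (with in-place mutation of an aliased
-- inner dict) by an explicit two-level chunking scan over maximal runs of equal dates;
-- same O(n) cost, alternative decomposition. Equivalence is proved on Pre_ (the inputs
-- where A's asserts pass, i.e. A returns); the ports omit the asserts, which never fire there.

-- ===== PORT A =====
-- Literal transliteration of A: one fold carrying (outer dict, curr_date).
-- `curr_date_data[state_code] = new_cases` mutates the inner dict aliased at key `date`
-- (after the if, curr_date = date), so it is `modify date`.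
def by_date_and_state (state_data : List (String × String × Int)) : List (String × List (String × Int)) :=
  let st := state_data.foldl
    (fun st row =>
      let d := st.1
      let curr := st.2
      let date := row.1
      let sc := row.2.1
      let nc := row.2.2
      let dc := if some date ≠ curr then (d.insert date PySem.Dict.empty, some date) else (d, curr)
      (dc.1.modify date PySem.Dict.empty (fun inn => inn.insert sc nc), dc.2))
    ((PySem.Dict.empty : PySem.Dict String (PySem.Dict String Int)), (none : Option String))
  st.1.items.map (fun p => (p.1, p.2.items))

-- ===== PORT B =====
-- B's inner while loop: consume the maximal prefix of rows whose date equals dt,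
-- returning the (state, cases) pairs of that run and the remaining suffix.
def pvRunSplit (dt : String) : List (String × String × Int) → List (String × Int) × List (String × String × Int)
  | [] => ([], [])
  | (d, s, n) :: t => if d = dt then ((s, n) :: (pvRunSplit dt t).1, (pvRunSplit dt t).2) else ([], (d, s, n) :: t)

theorem pvRunSplit_snd_length_le (dt : String) (l : List (String × String × Int)) :
    (pvRunSplit dt l).2.length ≤ l.length := by
  induction l with
  | nil => simp [pvRunSplit]
  | cons h t ih =>
    obtain ⟨d, s, n⟩ := h
    simp only [pvRunSplit]
    split
    · exact Nat.le_succ_of_le ih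
    · simp

-- B's outer while loop: each step handles one maximal run of equal dates.
def by_date_and_state_alt : List (String × String × Int) → List (String × List (String × Int))
  | [] => []
  | (dt, s, n) :: t =>
    (dt, (s, n) :: (pvRunSplit dt t).1) :: by_date_and_state_alt (pvRunSplit dt t).2
  termination_by l => l.length
  decreasing_by
    have := pvRunSplit_snd_length_le dt t
    simp
    omega

-- ===== PRECONDITION & SPEC =====
-- Pre_ is exactly "A's asserts pass": no date reappears after its run ended (the
-- consecutive-deduplicated date list has no duplicates), and two rows with the same date
-- never share a state code. Outside Pre_, A raises AssertionError (B does too).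
def Pre_by_date_and_state (state_data : List (String × String × Int)) : Prop :=
  (List.destutter (· ≠ ·) (state_data.map (fun r => r.1))).Nodup ∧
  state_data.Pairwise (fun a b => a.1 ≠ b.1 ∨ a.2.1 ≠ b.2.1)
instance (state_data : List (String × String × Int)) : Decidable (Pre_by_date_and_state state_data) := by
  unfold Pre_by_date_and_state; infer_instance

def pvWitness_by_date_and_state : (List (String × String × Int)) :=
  [("2020-03-01", "NY", 5), ("2020-03-01", "CA", 3), ("2020-03-02", "NY", 7)]

def Spec_by_date_and_state (state_data : List (String × String × Int)) (out : List (String × List (String × Int))) : Prop := out = by_date_and_state_alt state_data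
instance (state_data : List (String × String × Int)) (out : List (String × List (String × Int))) : Decidable (Spec_by_date_and_state state_data out) := by unfold Spec_by_date_and_state; infer_instance

-- ===== CLAIM (what is proved, stated in full; the proofs are below) =====
def Claim_equal_by_date_and_state : Prop := ∀ (state_data : List (String × String × Int)), Dom_by_date_and_state state_data → Pre_by_date_and_state state_data → Spec_by_date_and_state state_data (by_date_and_state state_data)

-- ===== LEMMAS AND PROOFS =====

-- The step function of A's fold, named for the proofs.
def pvStep (st : PySem.Dict String (PySem.Dict String Int) × Option String)
    (row : String × String × Int) : PySem.Dict String (PySem.Dict String Int) × Option String :=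
  let dc := if some row.1 ≠ st.2 then (st.1.insert row.1 PySem.Dict.empty, some row.1) else (st.1, st.2)
  (dc.1.modify row.1 PySem.Dict.empty (fun inn => inn.insert row.2.1 row.2.2), dc.2)

theorem by_date_and_state_eq_fold (l : List (String × String × Int)) :
    by_date_and_state l =
      ((l.foldl pvStep (PySem.Dict.empty, none)).1.items.map (fun p => (p.1, p.2.items))) := rfl

theorem pvModify_insert_self {ν : Type} (d : PySem.Dict String ν) (k : String) (x : ν)
    (dflt : ν) (f : ν → ν) : (d.insert k x).modify k dflt f = d.insert k (f x) := by
  simp [PySem.Dict.modify, PySem.Dict.getD_insert_self, PySem.Dict.insert_insert_self]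

-- A's fold absorbs a maximal run of rows dated c into the inner dict stored at c.
theorem pvFold_run (l : List (String × String × Int))
    (d : PySem.Dict String (PySem.Dict String Int)) (c : String) (x : PySem.Dict String Int) :
    l.foldl pvStep (d.insert c x, some c) =
      (pvRunSplit c l).2.foldl pvStep
        (d.insert c ((pvRunSplit c l).1.foldl (fun inn p => inn.insert p.1 p.2) x), some c) := by
  induction l generalizing x with
  | nil => simp [pvRunSplit]
  | cons h t ih =>
    obtain ⟨d1, s, n⟩ := h
    by_cases hd : d1 = c
    · subst hd
      have hstep : pvStep (d.insert d1 x, some d1) (d1, s, n)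
          = (d.insert d1 (x.insert s n), some d1) := by
        simp [pvStep, pvModify_insert_self]
      simp only [pvRunSplit, List.foldl_cons, hstep, ih]
      simp
    · simp [pvRunSplit, hd]

-- pvRunSplit decomposes the list: a prefix of rows dated c, then the rest.
theorem pvRunSplit_decomp (c : String) (l : List (String × String × Int)) :
    ∃ p, l = p ++ (pvRunSplit c l).2 ∧ (∀ r ∈ p, r.1 = c) ∧
      (pvRunSplit c l).1 = p.map (fun r => (r.2.1, r.2.2)) := by
  induction l with
  | nil => exact ⟨[], by simp [pvRunSplit]⟩
  | cons h t ih =>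
    obtain ⟨d, s, n⟩ := h
    by_cases hd : d = c
    · obtain ⟨p, hp1, hp2, hp3⟩ := ih
      refine ⟨(d, s, n) :: p, ?_, ?_, ?_⟩
      · simp [pvRunSplit, hd, ← hp1]
      · intro r hr
        rcases List.mem_cons.mp hr with h | h
        · rw [h]; exact hd
        · exact hp2 r h
      · simp [pvRunSplit, hd, hp3]
    · exact ⟨[], by simp [pvRunSplit, hd]⟩

-- destutter' over the dates of l skips the leading run of c.
theorem pvDestutter'_runSplit (l : List (String × String × Int)) (c : String) :
    List.destutter' (· ≠ ·) c (l.map (fun r => r.1)) =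
      c :: List.destutter (· ≠ ·) ((pvRunSplit c l).2.map (fun r => r.1)) := by
  induction l generalizing c with
  | nil => simp [pvRunSplit]
  | cons h t ih =>
    obtain ⟨d, s, n⟩ := h
    by_cases hd : d = c
    · subst hd
      simp [pvRunSplit, ih]
    · simp [pvRunSplit, hd, Ne.symm hd, List.destutter]

theorem pvMem_destutter'_ne (l : List String) (a x : String) (h : x ∈ l) :
    x ∈ List.destutter' (· ≠ ·) a l ∨ x = a := by
  induction l generalizing a with
  | nil => simp at h
  | cons b t ih =>
    by_cases hab : a ≠ b
    · rw [List.destutter'_cons_pos _ hab]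
      rcases List.mem_cons.mp h with rfl | h
      · exact Or.inl (List.mem_cons_of_mem _ (List.mem_destutter' _ _ _))
      · rcases ih b h with h' | rfl
        · exact Or.inl (List.mem_cons_of_mem _ h')
        · exact Or.inl (List.mem_cons_of_mem _ (List.mem_destutter' _ _ _))
    · rw [not_ne_iff] at hab
      subst hab
      rw [List.destutter'_cons_neg _ (by simp)]
      rcases List.mem_cons.mp h with rfl | h
      · exact Or.inr rfl
      · exact ih a h

theorem pvMem_destutter_ne (l : List String) (x : String) (h : x ∈ l) :
    x ∈ List.destutter (· ≠ ·) l := by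
  cases l with
  | nil => simp at h
  | cons b t =>
    rw [List.destutter_cons']
    rcases List.mem_cons.mp h with rfl | h
    · exact List.mem_destutter' _ _ _
    · rcases pvMem_destutter'_ne t b x h with h' | rfl
      · exact h'
      · exact List.mem_destutter' _ _ _

-- Main invariant: running A's fold over a fresh, well-formed suffix appends B's groups.
theorem pvMain (N : Nat) : ∀ (l : List (String × String × Int)), l.length ≤ N →
    ∀ (d : PySem.Dict String (PySem.Dict String Int)) (curr : Option String),
    (∀ r ∈ l, d.contains r.1 = false) →
    (curr = none ∨ ∃ c, c ∈ d.keys ∧ curr = some c) →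
    d.keys.Nodup →
    Pre_by_date_and_state l →
    ((l.foldl pvStep (d, curr)).1.items.map (fun p => (p.1, p.2.items)))
      = d.items.map (fun p => (p.1, p.2.items)) ++ by_date_and_state_alt l := by
  induction N with
  | zero =>
    intro l hl d curr _ _ _ _
    have : l = [] := List.length_eq_zero_iff.mp (Nat.le_zero.mp hl)
    subst this
    simp [by_date_and_state_alt]
  | succ N ih =>
    intro l hl d curr h1 h2 h3 hPre
    match l with
    | [] => simp [by_date_and_state_alt]
    | (c, s, n) :: t =>
      have hdc : d.contains c = false := h1 (c, s, n) (List.mem_cons_self ..)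
      have hcurr : some c ≠ curr := by
        rcases h2 with rfl | ⟨c', hc', rfl⟩
        · simp
        · intro hcc
          have hcon : d.contains c' = true := (PySem.Dict.contains_iff_mem_keys _ _).mpr hc'
          rw [← Option.some_inj.mp hcc, hdc] at hcon
          exact Bool.false_ne_true hcon
      have hstep : pvStep (d, curr) (c, s, n)
          = (d.insert c (PySem.Dict.empty.insert s n), some c) := by
        simp [pvStep, if_pos hcurr, pvModify_insert_self]
      rw [List.foldl_cons, hstep, pvFold_run t d c (PySem.Dict.empty.insert s n)]
      obtain ⟨p, hp1, hp2, hp3⟩ := pvRunSplit_decomp c t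
      obtain ⟨hD, hP⟩ := hPre
      have hDl : List.destutter (· ≠ ·) (((c, s, n) :: t).map (fun r => r.1))
          = c :: List.destutter (· ≠ ·) ((pvRunSplit c t).2.map (fun r => r.1)) := by
        rw [List.map_cons, List.destutter_cons', pvDestutter'_runSplit]
      rw [hDl] at hD
      have hcnotin : c ∉ List.destutter (· ≠ ·) ((pvRunSplit c t).2.map (fun r => r.1)) :=
        (List.nodup_cons.mp hD).1
      have hcr : ∀ row ∈ (pvRunSplit c t).2, row.1 ≠ c := by
        intro row hrow heq
        exact hcnotin (pvMem_destutter_ne _ _ (List.mem_map.mpr ⟨row, hrow, heq⟩))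
      rw [hp1] at hP
      have hP' := List.pairwise_cons.mp hP
      have hHead := hP'.1
      have hPt := hP'.2
      -- states of the run are distinct and differ from s
      have hsg : ∀ a ∈ (pvRunSplit c t).1, a.1 ≠ s := by
        intro a ha
        rw [hp3] at ha
        obtain ⟨r0, hr0, rfl⟩ := List.mem_map.mp ha
        have := hHead r0 (List.mem_append_left _ hr0)
        rcases this with h' | h'
        · exact absurd (hp2 r0 hr0) (Ne.symm h')
        · exact fun hh => h' (hh ▸ rfl)
      have hPp : p.Pairwise (fun a b => a.1 ≠ b.1 ∨ a.2.1 ≠ b.2.1) :=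
        hPt.sublist (List.sublist_append_left p _)
      have hgnodup : ((pvRunSplit c t).1.map (fun a => a.1)).Nodup := by
        rw [hp3, List.map_map, List.Nodup, List.pairwise_map]
        refine hPp.imp_of_mem ?_
        intro a b ha hb hr
        rcases hr with h' | h'
        · exact absurd ((hp2 a ha).trans (hp2 b hb).symm) h'
        · simpa using h'
      -- the inner dict built for the run lists exactly the run's (state, cases) pairs
      have hinner : ((pvRunSplit c t).1.foldl (fun inn q => inn.insert q.1 q.2)
            (PySem.Dict.empty.insert s n)).items = (s, n) :: (pvRunSplit c t).1 := by
        have hfresh : ∀ a ∈ (pvRunSplit c t).1,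
            (PySem.Dict.empty.insert s n).contains ((fun a : String × Int => a.1) a) = false := by
          intro a ha
          simp [PySem.Dict.contains_insert, PySem.Dict.contains_empty, hsg a ha]
        have hfi := PySem.Dict.items_foldl_insert_fresh ((pvRunSplit c t).1)
          (fun a : String × Int => a.1) (fun a => a.2) (PySem.Dict.empty.insert s n) hfresh
          (by simpa using hgnodup)
        simp only [] at hfi
        rw [hfi, PySem.Dict.items_insert_of_not_contains _ _ (by simp [PySem.Dict.contains_empty])]
        simp [PySem.Dict.empty]
      -- the induction hypothesis on the remaining suffix
      have hrlen : (pvRunSplit c t).2.length ≤ N := by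
        have h1 := pvRunSplit_snd_length_le c t
        have h2 : t.length + 1 ≤ N + 1 := by simpa using hl
        omega
      have hmem_t : ∀ row ∈ (pvRunSplit c t).2, row ∈ t := by
        intro row hrow
        rw [hp1]
        exact List.mem_append_right _ hrow
      have hih := ih (pvRunSplit c t).2 hrlen
        (d.insert c ((pvRunSplit c t).1.foldl (fun inn q => inn.insert q.1 q.2)
          (PySem.Dict.empty.insert s n))) (some c)
        (by
          intro row hrow
          rw [PySem.Dict.contains_insert]
          simp only [Bool.or_eq_false_iff, beq_eq_false_iff_ne]
          exact ⟨hcr row hrow, h1 row (List.mem_cons_of_mem _ (hmem_t row hrow))⟩)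
        (Or.inr ⟨c, by rw [PySem.Dict.mem_keys_insert]; exact Or.inl rfl, rfl⟩)
        (PySem.Dict.nodup_keys_insert _ _ _ h3)
        ⟨(List.nodup_cons.mp hD).2, hPt.sublist (List.sublist_append_right p _)⟩
      rw [hih]
      rw [PySem.Dict.items_insert_of_not_contains _ _ hdc]
      simp only [List.map_append, List.map_cons, List.map_nil, hinner]
      rw [by_date_and_state_alt]
      simp

-- ===== VERDICT (by name: the statement is the Claim_ definition above) =====
theorem by_date_and_state_spec : Claim_equal_by_date_and_state := by
  intro l _hDom hPre
  unfold Spec_by_date_and_state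
  rw [by_date_and_state_eq_fold]
  have := pvMain l.length l le_rfl PySem.Dict.empty none (by simp [PySem.Dict.contains_empty])
    (Or.inl rfl) (by simp [PySem.Dict.keys_empty]) hPre
  simpa [PySem.Dict.items] using this
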